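-- pv_equiv track=rewrite | github.com/SurinSeong/algorithm | solving-club/1961.py | rotation_list
-- ===== SOURCE A (Python) =====
-- def rotation_list(data, n):
--     rotation_90 = list(map(list, zip(*data[::-1])))
--     rotation_180 = list(map(list, zip(*rotation_90[::-1])))
--     rotation_270 = list(map(list, zip(*rotation_180[::-1])))
--
--     rotations = [rotation_90, rotation_180, rotation_270]
--
--     new_matrix = [[''] * 3 for _ in range(n)]
--
--     for i in range(n):
--         for k in range(3):
--             for j in range(n):
--                 new_matrix[i][k] += str(rotations[k][i][j])
--
--     return new_matrix
-- ===== SOURCE B (Python) =====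
-- def rotation_list(data, n):
--     # Each rotation's cell comes straight from data by index arithmetic:
--     # rot90[i][j] = data[n-1-j][i], rot180[i][j] = data[n-1-i][n-1-j], rot270[i][j] = data[j][n-1-i].
--     return [
--         [''.join(str(data[n - 1 - j][i]) for j in range(n)),
--          ''.join(str(data[n - 1 - i][n - 1 - j]) for j in range(n)),
--          ''.join(str(data[j][n - 1 - i]) for j in range(n))]
--         for i in range(n)
--     ]
-- ===== Notes on version B (the rewrite author's own statement) =====
-- stated objective: simpler
-- what changed: B computes each rotation's cell directly from data by index arithmetic (rot90[i][j]=data[n-1-j][i], rot180[i][j]=data[n-1-i][n-1-j], rot270[i][j]=data[j][n-1-i]) and joins the three row strings in one comprehension, instead of materialising three chained zip-transpose rotation matrices and mutating an accumulator matrix with a triple nested loop; …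
-- outside the precondition, e.g. on rotation_list([[1, 2], [3, 4]], 1): A returns [['3', '4', '2']], B returns [['1', '1', '1']]
import Mathlib
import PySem

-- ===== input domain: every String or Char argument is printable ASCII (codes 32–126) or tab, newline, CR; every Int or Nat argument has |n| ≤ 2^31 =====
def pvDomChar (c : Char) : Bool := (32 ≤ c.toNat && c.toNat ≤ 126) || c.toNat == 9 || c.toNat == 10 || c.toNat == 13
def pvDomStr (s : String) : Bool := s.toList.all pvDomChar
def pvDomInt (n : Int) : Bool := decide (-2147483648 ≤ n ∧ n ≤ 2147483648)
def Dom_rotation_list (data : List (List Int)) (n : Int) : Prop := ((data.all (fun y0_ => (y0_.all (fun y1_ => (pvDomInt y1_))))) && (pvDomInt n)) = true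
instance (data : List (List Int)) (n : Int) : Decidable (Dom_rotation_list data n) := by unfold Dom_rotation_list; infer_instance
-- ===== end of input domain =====

-- B computes each rotation's cell directly from `data` by index arithmetic instead of
-- chaining three zip-transpose rotations and mutating an accumulator matrix (objective: simpler).

-- ===== PORT A =====
-- termination helper for pyZipStar (cited by its decreasing_by)
theorem pyZipStar_tail_sum (m : List (List Int)) (h : ∀ r ∈ m, r.isEmpty = false) :
    ((m.map List.tail).map List.length).sum + m.length = (m.map List.length).sum := by
  induction m with
  | nil => simp
  | cons r rest ih =>
    simp only [List.map_cons, List.sum_cons, List.length_cons]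
    have hr := h r (by simp)
    have h1 : r.tail.length + 1 = r.length := by
      cases r with
      | nil => simp at hr
      | cons a l => simp
    have h2 := ih (fun x hx => h x (by simp [hx]))
    omega

-- zip(*m): truncating transpose, exactly Python's zip over the rows of m
def pyZipStar (m : List (List Int)) : List (List Int) :=
  if h : m = [] ∨ m.any (·.isEmpty) then []
  else (m.map (fun r => r.headD 0)) :: pyZipStar (m.map List.tail)
termination_by (m.map List.length).sum
decreasing_by
  rw [not_or] at h
  obtain ⟨hne, hall⟩ := h
  have hall' : ∀ r ∈ m, r.isEmpty = false := by
    intro r hr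
    cases hre : r.isEmpty with
    | false => rfl
    | true => exact absurd (List.any_eq_true.mpr ⟨r, hr, hre⟩) hall
  have hsum := pyZipStar_tail_sum m hall'
  have hm : 0 < m.length := List.length_pos_iff.mpr hne
  simp only [List.map_map] at hsum
  simp
  omega

-- literal transliteration of A; data[::-1] is List.reverse;
-- index reads use getD defaults — in range on every input admitted by Pre_ (Python raises IndexError outside, excluded by Pre_)
def rotation_list (data : List (List Int)) (n : Int) : List (List String) :=
  let rotation_90 := pyZipStar data.reverse
  let rotation_180 := pyZipStar rotation_90.reverse
  let rotation_270 := pyZipStar rotation_180.reverse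
  let rotations := [rotation_90, rotation_180, rotation_270]
  let new_matrix := (PySem.List.pyRange 0 n 1).map (fun _ => ["", "", ""])
  (PySem.List.pyRange 0 n 1).foldl (fun nm i =>
    nm.set i.toNat (
      (PySem.List.pyRange 0 3 1).foldl (fun row k =>
        row.set k.toNat (
          (PySem.List.pyRange 0 n 1).foldl (fun s j =>
            s ++ PySem.Int.toStr (((rotations.getD k.toNat []).getD i.toNat []).getD j.toNat 0))
            (row.getD k.toNat "")))
        (nm.getD i.toNat []))) new_matrix

-- ===== PORT B =====
-- literal transliteration of Source B: one comprehension, three joins per row, direct index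
-- arithmetic into data; the indices n-1-j, n-1-i are nonnegative and in range on every
-- input admitted by Pre_ (exact there), so getD/.toNat reads them exactly
def rotation_list_alt (data : List (List Int)) (n : Int) : List (List String) :=
  (PySem.List.pyRange 0 n 1).map (fun i =>
    [ String.join ((PySem.List.pyRange 0 n 1).map (fun j =>
        PySem.Int.toStr ((data.getD (n - 1 - j).toNat []).getD i.toNat 0))),
      String.join ((PySem.List.pyRange 0 n 1).map (fun j =>
        PySem.Int.toStr ((data.getD (n - 1 - i).toNat []).getD (n - 1 - j).toNat 0))),
      String.join ((PySem.List.pyRange 0 n 1).map (fun j =>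
        PySem.Int.toStr ((data.getD j.toNat []).getD (n - 1 - i).toNat 0))) ])

-- ===== PRECONDITION & SPEC =====
-- Pre_ excludes data that is not exactly an n×n matrix (unless n ≤ 0, where both return []):
-- on smaller or short-row data A raises IndexError, and on larger or ragged data A's returned
-- strings draw on cells outside the n×n block via zip truncation — an unspecified corner where
-- B's reading of the top-left n×n block is equally defensible.
def Pre_rotation_list (data : List (List Int)) (n : Int) : Prop :=
  n ≤ 0 ∨ ((data.length : Int) = n ∧ ∀ row ∈ data, (row.length : Int) = n)
instance (data : List (List Int)) (n : Int) : Decidable (Pre_rotation_list data n) := by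
  unfold Pre_rotation_list; infer_instance
def pvWitness_rotation_list : List (List Int) × Int := ([[1, 2], [3, 4]], 2)

def Spec_rotation_list (data : List (List Int)) (n : Int) (out : List (List String)) : Prop := out = rotation_list_alt data n
instance (data : List (List Int)) (n : Int) (out : List (List String)) : Decidable (Spec_rotation_list data n out) := by unfold Spec_rotation_list; infer_instance

-- ===== CLAIM (what is proved, stated in full; the proofs are below) =====
def Claim_equal_rotation_list : Prop := ∀ (data : List (List Int)) (n : Int), Dom_rotation_list data n → Pre_rotation_list data n → Spec_rotation_list data n (rotation_list data n)

-- ===== LEMMAS AND PROOFS =====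

theorem getD_map_lt {α β : Type} (f : α → β) (l : List α) (j : Nat) (hj : j < l.length) (d : β) :
    (l.map f).getD j d = f l[j] := by
  rw [List.getD_eq_getElem?_getD, List.getElem?_map, List.getElem?_eq_getElem hj]
  rfl

theorem getD_lt {α : Type} (l : List α) (j : Nat) (hj : j < l.length) (d : α) :
    l.getD j d = l[j] := by
  rw [List.getD_eq_getElem?_getD, List.getElem?_eq_getElem hj]
  rfl

theorem tail_getD_int (r : List Int) (i : Nat) (d : Int) : r.tail.getD i d = r.getD (i + 1) d := by
  cases r <;> simp [List.getD]

theorem headD_eq_getD_zero (r : List Int) (d : Int) : r.headD d = r.getD 0 d := by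
  cases r <;> simp

-- zip(*m) of a nonempty m whose shortest row has length c, in closed form
theorem pyZipStar_closed (c : Nat) : ∀ (m : List (List Int)), m ≠ [] → (∀ r ∈ m, c ≤ r.length) →
    (∃ r ∈ m, r.length = c) →
    pyZipStar m = (List.range c).map (fun i => m.map (fun r => r.getD i 0)) := by
  induction c with
  | zero =>
    intro m hne _ hex
    rw [pyZipStar.eq_1]
    have : m.any (·.isEmpty) = true := by
      obtain ⟨r, hr, hr0⟩ := hex
      exact List.any_eq_true.mpr ⟨r, hr, by simpa [List.isEmpty_iff, List.length_eq_zero_iff] using hr0⟩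
    simp [this]
  | succ c ih =>
    intro m hne hc hex
    rw [pyZipStar.eq_1]
    have hnoempty : m.any (·.isEmpty) = false := by
      rw [List.any_eq_false]
      intro r hr
      have := hc r hr
      simp only [List.isEmpty_iff]
      intro h; rw [h] at this; simp at this
    rw [dif_neg (by simp [hne, hnoempty])]
    have htail := ih (m.map List.tail) (by simpa using hne)
      (by intro r hr; obtain ⟨s, hs, rfl⟩ := List.mem_map.mp hr
          have := hc s hs; simp; omega)
      (by obtain ⟨r, hr, hrl⟩ := hex
          exact ⟨r.tail, List.mem_map_of_mem hr, by simp [hrl]⟩)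
    rw [htail, List.range_succ_eq_map, List.map_cons, List.map_map]
    congr 1
    · exact List.map_congr_left (fun r _ => headD_eq_getD_zero r 0)
    · apply List.map_congr_left
      intro i _
      simp only [Function.comp]
      rw [List.map_map]
      exact List.map_congr_left (fun r _ => tail_getD_int r i 0)

theorem foldl_str_append (l : List String) : ∀ (a b : String),
    l.foldl (· ++ ·) (a ++ b) = a ++ l.foldl (· ++ ·) b := by
  induction l with
  | nil => intro a b; simp
  | cons x xs ih =>
    intro a b
    simp only [List.foldl_cons]
    rw [String.append_assoc, ih]

theorem join_cons (s : String) (l : List String) : String.join (s :: l) = s ++ String.join l := by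
  simp only [String.join, List.foldl_cons]
  have h := foldl_str_append l s ""
  rw [show (s ++ "" : String) = s from by simp] at h
  rw [show ("" ++ s : String) = s from by simp]
  exact h

-- string fold-append is join of the map
theorem foldl_append_join {α : Type} (f : α → String) : ∀ (l : List α) (init : String),
    l.foldl (fun s x => s ++ f x) init = init ++ String.join (l.map f) := by
  intro l
  induction l with
  | nil => intro init; simp [String.join]
  | cons x xs ih =>
    intro init
    rw [List.foldl_cons, ih, List.map_cons, join_cons, String.append_assoc]

-- a left fold that sets position i at step i over consecutive indices, on a replicate tail
theorem foldl_set_range' {α : Type} (g : Nat → α → α) (d v : α) :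
    ∀ (c a : Nat) (pre : List α), pre.length = a →
    (List.range' a c).foldl (fun nm i => nm.set i (g i (nm.getD i d))) (pre ++ List.replicate c v)
      = pre ++ (List.range' a c).map (fun i => g i v) := by
  intro c
  induction c with
  | zero => intro a pre _; simp
  | succ c ih =>
    intro a pre hpre
    rw [List.range'_succ, List.foldl_cons, List.map_cons]
    have hget : (pre ++ List.replicate (c + 1) v).getD a d = v := by
      rw [List.getD_eq_getElem?_getD, List.getElem?_append_right (by omega)]
      simp [hpre]
    have hset : (pre ++ List.replicate (c + 1) v).set a (g a v)
        = (pre ++ [g a v]) ++ List.replicate c v := by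
      rw [List.set_append_right _ _ (by omega), hpre]
      simp [List.replicate_succ]
    rw [hget, hset, ih (a + 1) (pre ++ [g a v]) (by simp [hpre])]
    simp

theorem foldl_set_range {α : Type} (g : Nat → α → α) (d v : α) (N : Nat) :
    (List.range N).foldl (fun nm i => nm.set i (g i (nm.getD i d))) (List.replicate N v)
      = (List.range N).map (fun i => g i v) := by
  rw [List.range_eq_range']
  simpa using foldl_set_range' g d v N 0 [] rfl

theorem pyRange03 : PySem.List.pyRange 0 3 1 = [0, 1, 2] := by decide

theorem rotation_list_spec_aux (data : List (List Int)) (n : Int)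
    (hpre : n ≤ 0 ∨ ((data.length : Int) = n ∧ ∀ row ∈ data, (row.length : Int) = n)) :
    rotation_list data n = rotation_list_alt data n := by
  by_cases hn0 : n ≤ 0
  · simp [rotation_list, rotation_list_alt, PySem.List.pyRange_one_eq_nil hn0]
  rcases hpre with h | ⟨hr, hc⟩
  · exact absurd h hn0
  obtain ⟨N, rfl⟩ : ∃ N : Nat, ((N : Nat) : Int) = n := ⟨n.toNat, Int.toNat_of_nonneg (by omega)⟩
  have hNpos : 0 < N := by exact_mod_cast lt_of_not_ge (by simpa using hn0)
  have hNr : data.length = N := by exact_mod_cast hr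
  have hNc : ∀ row ∈ data, row.length = N := fun row h => by exact_mod_cast hc row h
  have hdne : data ≠ [] := by
    intro h; rw [h] at hNr; simp at hNr; omega
  -- rotation 90: N rows of length N
  set R90 := pyZipStar data.reverse with hR90
  have hR90c : R90 = (List.range N).map (fun i => data.reverse.map (fun r => r.getD i 0)) := by
    rw [hR90]
    obtain ⟨rw0, hrw0⟩ := List.exists_mem_of_ne_nil data hdne
    exact pyZipStar_closed N data.reverse (by simpa using hdne)
      (fun r hr' => le_of_eq (hNc r (List.mem_reverse.mp hr')).symm)
      ⟨rw0, List.mem_reverse.mpr hrw0, hNc rw0 hrw0⟩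
  have hR90len : R90.length = N := by rw [hR90c]; simp
  have e90 : ∀ i j, i < N → j < N → (R90.getD i []).getD j 0
      = (data.getD (N - 1 - j) []).getD i 0 := by
    intro i j hi hj
    rw [hR90c, getD_map_lt _ _ i (by simpa using hi), List.getElem_range,
        getD_map_lt _ _ j (by simp; omega), List.getElem_reverse,
        ← getD_lt data (data.length - 1 - j) (by omega) [], hNr]
  -- rotation 180: N rows of length N
  set R180 := pyZipStar R90.reverse with hR180
  have hR90rows : ∀ r ∈ R90.reverse, r.length = N := by
    intro r hr'
    have hrm : r ∈ R90 := List.mem_reverse.mp hr'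
    rw [hR90c] at hrm
    obtain ⟨i, _, rfl⟩ := List.mem_map.mp hrm
    simp [hNr]
  have hR180c : R180 = (List.range N).map (fun i => R90.reverse.map (fun r => r.getD i 0)) := by
    rw [hR180]
    refine pyZipStar_closed N R90.reverse
      (by simp [← List.length_pos_iff, hR90len]; omega)
      (fun r hr' => le_of_eq (hR90rows r hr').symm) ?_
    obtain ⟨r, hr'⟩ := List.exists_mem_of_ne_nil R90.reverse
      (by simp [← List.length_pos_iff, hR90len]; omega)
    exact ⟨r, hr', hR90rows r hr'⟩
  have hR180len : R180.length = N := by rw [hR180c]; simp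
  have e180 : ∀ i j, i < N → j < N → (R180.getD i []).getD j 0
      = (data.getD (N - 1 - i) []).getD (N - 1 - j) 0 := by
    intro i j hi hj
    rw [hR180c, getD_map_lt _ _ i (by simpa using hi), List.getElem_range,
        getD_map_lt _ _ j (by rw [List.length_reverse, hR90len]; omega), List.getElem_reverse,
        ← getD_lt R90 (R90.length - 1 - j) (by omega) [], hR90len]
    exact e90 (N - 1 - j) i (by omega) hi
  -- rotation 270: N rows of length N
  set R270 := pyZipStar R180.reverse with hR270
  have hR180rows : ∀ r ∈ R180.reverse, r.length = N := by
    intro r hr'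
    have hrm : r ∈ R180 := List.mem_reverse.mp hr'
    rw [hR180c] at hrm
    obtain ⟨i, _, rfl⟩ := List.mem_map.mp hrm
    simpa using hR90len
  have hR270c : R270 = (List.range N).map (fun i => R180.reverse.map (fun r => r.getD i 0)) := by
    rw [hR270]
    refine pyZipStar_closed N R180.reverse
      (by simp [← List.length_pos_iff, hR180len]; omega)
      (fun r hr' => le_of_eq (hR180rows r hr').symm) ?_
    obtain ⟨r, hr'⟩ := List.exists_mem_of_ne_nil R180.reverse
      (by simp [← List.length_pos_iff, hR180len]; omega)
    exact ⟨r, hr', hR180rows r hr'⟩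
  have e270 : ∀ i j, i < N → j < N → (R270.getD i []).getD j 0
      = (data.getD j []).getD (N - 1 - i) 0 := by
    intro i j hi hj
    rw [hR270c, getD_map_lt _ _ i (by simpa using hi), List.getElem_range,
        getD_map_lt _ _ j (by rw [List.length_reverse, hR180len]; omega), List.getElem_reverse,
        ← getD_lt R180 (R180.length - 1 - j) (by omega) [], hR180len]
    have h := e180 (N - 1 - j) i (by omega) hi
    rw [h]
    congr 2
    omega
  -- assemble
  show rotation_list data (N : Int) = rotation_list_alt data (N : Int)
  unfold rotation_list rotation_list_alt
  simp only [← hR90]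
  simp only [← hR180]
  simp only [← hR270]
  simp only [pyRange03, PySem.List.pyRange_zero_natCast, List.foldl_map, List.map_map]
  simp only [Function.comp_def, Int.toNat_natCast]
  rw [List.map_const', List.length_range]
  rw [foldl_set_range (fun (i : Nat) (v : List String) =>
        List.foldl (fun (row : List String) (k : Int) =>
          row.set k.toNat (List.foldl (fun (s : String) (j : Nat) =>
            s ++ PySem.Int.toStr ((([R90, R180, R270].getD k.toNat []).getD i []).getD j 0))
            (row.getD k.toNat "") (List.range N))) v [0, 1, 2]) [] ["", "", ""] N]
  apply List.map_congr_left
  intro i hi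
  have hiN : i < N := List.mem_range.mp hi
  simp only [List.foldl_cons, List.foldl_nil]
  norm_num [List.set, List.getD, show Int.toNat 2 = 2 from rfl]
  have comp : ∀ (R : List (List Int)) (eB : Nat → Int),
      (∀ j, j < N → (R[i]?.getD [])[j]?.getD 0 = eB j) →
      List.foldl (fun (s : String) (j : Nat) => s ++ PySem.Int.toStr ((R[i]?.getD [])[j]?.getD 0)) ""
          (List.range N)
        = String.join ((List.range N).map (fun j => PySem.Int.toStr (eB j))) := by
    intro R eB hAB
    rw [foldl_append_join (fun j => PySem.Int.toStr ((R[i]?.getD [])[j]?.getD 0)) (List.range N) ""]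
    rw [show ∀ s : String, "" ++ s = s from fun s => by simp]
    exact congrArg String.join (List.map_congr_left fun j hj =>
      congrArg PySem.Int.toStr (hAB j (List.mem_range.mp hj)))
  have h1 : ∀ j, j < N → (R90[i]?.getD [])[j]?.getD 0
      = (data[N - 1 - j]?.getD [])[i]?.getD 0 := by
    intro j hj
    have h := e90 i j (by omega) (by omega)
    simpa [List.getD_eq_getElem?_getD] using h
  have h2 : ∀ j, j < N → (R180[i]?.getD [])[j]?.getD 0
      = (data[N - 1 - i]?.getD [])[N - 1 - j]?.getD 0 := by
    intro j hj
    have h := e180 i j (by omega) (by omega)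
    simpa [List.getD_eq_getElem?_getD] using h
  have h3 : ∀ j, j < N → (R270[i]?.getD [])[j]?.getD 0
      = (data[j]?.getD [])[N - 1 - i]?.getD 0 := by
    intro j hj
    have h := e270 i j (by omega) (by omega)
    simpa [List.getD_eq_getElem?_getD] using h
  rw [comp R90 _ h1, comp R180 _ h2, comp R270 _ h3]
  exact ⟨rfl, rfl, rfl⟩

-- ===== VERDICT (by name: the statement is the Claim_ definition above) =====
theorem rotation_list_spec : Claim_equal_rotation_list := by
  intro data n _ hpre
  unfold Spec_rotation_list
  exact rotation_list_spec_aux data n hpre
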